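-- pv_equiv track=rewrite | github.com/wakame-tech/kyopro | src/abc023/abc023_b/main.py | solve
-- ===== SOURCE A (Python) =====
-- def solve(s):
--     t = 'b'
--     i = 0
--     if s == t:
--         return 0
--
--     while len(t) <= len(s):
--         if i % 3 == 0:
--             t = 'a' + t + 'c'
--         elif i % 3 == 1:
--             t = 'c' + t + 'a'
--         else:
--             t = 'b' + t + 'b'
--         if s == t:
--             return i + 1
--         i += 1
--     return -1
-- ===== SOURCE B (Python) =====
-- def solve(s):
--     n = len(s)
--     if n % 2 == 0:
--         return -1
--     k = n // 2
--     if s[k] != 'b':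
--         return -1
--     for d in range(1, k + 1):
--         r = (d - 1) % 3
--         if r == 0:
--             pl, pr = 'a', 'c'
--         elif r == 1:
--             pl, pr = 'c', 'a'
--         else:
--             pl, pr = 'b', 'b'
--         if s[k - d] != pl or s[k + d] != pr:
--             return -1
--     return k
-- ===== Notes on version B (the rewrite author's own statement) =====
-- stated objective: faster
-- what changed: Instead of re-building the layered string step by step and comparing whole strings each iteration, B checks the center and each symmetric character pair of s once, computing the step count directly from the length.
import Mathlib
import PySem

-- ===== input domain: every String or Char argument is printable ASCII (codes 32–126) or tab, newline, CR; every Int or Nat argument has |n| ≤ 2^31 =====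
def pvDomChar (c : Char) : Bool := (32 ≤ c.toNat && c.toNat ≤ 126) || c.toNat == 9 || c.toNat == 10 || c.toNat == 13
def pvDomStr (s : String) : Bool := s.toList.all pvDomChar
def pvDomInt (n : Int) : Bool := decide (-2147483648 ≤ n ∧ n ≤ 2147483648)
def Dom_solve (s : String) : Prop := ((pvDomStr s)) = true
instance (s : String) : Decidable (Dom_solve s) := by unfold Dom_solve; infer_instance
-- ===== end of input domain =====

-- B replaces A's iterative rebuilding of the layered string (quadratic) by a single
-- linear pass checking the center and the symmetric character pairs of s.

-- ===== PORT A =====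
-- A's while loop: t grows by 2 characters each iteration, terminating once len t > len s.
def solveLoopA (s t : List Char) (i : Nat) : Int :=
  if t.length ≤ s.length then
    let t' := if i % 3 = 0 then 'a' :: t ++ ['c']
              else if i % 3 = 1 then 'c' :: t ++ ['a']
              else 'b' :: t ++ ['b']
    if s = t' then ((i : Int) + 1)
    else solveLoopA s t' (i + 1)
  else -1
termination_by s.length + 1 - t.length
decreasing_by
  split_ifs <;> simp only [List.length_cons, List.length_append, List.length_nil] <;> omega

def solve (s : String) : Int :=
  if s.toList = ['b'] then 0 else solveLoopA s.toList ['b'] 0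

-- ===== PORT B =====
-- the (left, right) characters of layer d (d = distance from the centre)
def pairFor (d : Nat) : Char × Char :=
  if (d - 1) % 3 = 0 then ('a', 'c')
  else if (d - 1) % 3 = 1 then ('c', 'a')
  else ('b', 'b')

-- B's for-loop over d = 1 .. k, with early return -1 on a mismatching pair
def checkLayers (l : List Char) (k d : Nat) : Bool :=
  if d ≤ k then
    if l[k - d]? = some (pairFor d).1 ∧ l[k + d]? = some (pairFor d).2 then
      checkLayers l k (d + 1)
    else false
  else true
termination_by k + 1 - d

def solve_alt (s : String) : Int :=
  let l := s.toList
  let n := l.length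
  if n % 2 = 0 then -1
  else
    let k := n / 2
    if l[k]? ≠ some 'b' then -1
    else if checkLayers l k 1 then (k : Int) else -1

-- ===== PRECONDITION & SPEC =====
def Spec_solve (s : String) (out : Int) : Prop := out = solve_alt s
instance (s : String) (out : Int) : Decidable (Spec_solve s out) := by unfold Spec_solve; infer_instance

-- ===== CLAIM (what is proved, stated in full; the proofs are below) =====
def Claim_equal_solve : Prop := ∀ (s : String), Dom_solve s → Spec_solve s (solve s)

-- ===== LEMMAS AND PROOFS =====

-- the string A has built after k loop iterations
def T : Nat → List Char
  | 0 => ['b']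
  | (k + 1) =>
    if k % 3 = 0 then 'a' :: T k ++ ['c']
    else if k % 3 = 1 then 'c' :: T k ++ ['a']
    else 'b' :: T k ++ ['b']

-- the character of T k at index j, expressed by distance from the centre
def tc (k j : Nat) : Char :=
  if j = k then 'b'
  else if j < k then
    if (k - j - 1) % 3 = 0 then 'a' else if (k - j - 1) % 3 = 1 then 'c' else 'b'
  else
    if (j - k - 1) % 3 = 0 then 'c' else if (j - k - 1) % 3 = 1 then 'a' else 'b'

theorem T_length (k : Nat) : (T k).length = 2 * k + 1 := by
  induction k with
  | zero => simp [T]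
  | succ k ih => simp only [T]; split_ifs <;> simp [ih] <;> omega

theorem tc_succ (k j : Nat) : tc (k + 1) (j + 1) = tc k j := by
  unfold tc
  simp only [Nat.add_lt_add_iff_right, Nat.add_right_cancel_iff, Nat.succ_sub_succ]

theorem T_get (k : Nat) : ∀ j, j < 2 * k + 1 → (T k)[j]? = some (tc k j) := by
  induction k with
  | zero =>
    intro j hj
    interval_cases j
    simp [T, tc]
  | succ k ih =>
    intro j hj
    have hlen : (T k).length = 2 * k + 1 := T_length k
    have hstep : T (k + 1) =
        (if k % 3 = 0 then 'a' else if k % 3 = 1 then 'c' else 'b') :: T k ++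
        [(if k % 3 = 0 then 'c' else if k % 3 = 1 then 'a' else 'b')] := by
      simp only [T]; split_ifs <;> rfl
    rcases Nat.eq_zero_or_eq_succ_pred j with hj0 | hj1
    · subst hj0
      rw [hstep]
      have : tc (k + 1) 0 =
          (if k % 3 = 0 then 'a' else if k % 3 = 1 then 'c' else 'b') := by
        unfold tc
        have h1 : (0 : Nat) ≠ k + 1 := by omega
        have h2 : (0 : Nat) < k + 1 := by omega
        simp only [h1, if_false, h2, if_true]
        have : k + 1 - 0 - 1 = k := by omega
        rw [this]
      rw [this]
      rfl
    · obtain ⟨j', rfl⟩ : ∃ j', j = j' + 1 := ⟨j - 1, by omega⟩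
      rw [hstep, tc_succ]
      by_cases hlast : j' = 2 * k + 1
      · subst hlast
        have : tc k (2 * k + 1) =
            (if k % 3 = 0 then 'c' else if k % 3 = 1 then 'a' else 'b') := by
          unfold tc
          have h1 : ¬ (2 * k + 1 = k) := by omega
          have h2 : ¬ (2 * k + 1 < k) := by omega
          simp only [h1, if_false, h2]
          have : 2 * k + 1 - k - 1 = k := by omega
          rw [this]
        rw [this]
        have : (2 * k + 1) + 1 = ((T k).length + 1) := by omega
        simp [hlen]
      · have hj' : j' < 2 * k + 1 := by omega
        have : (((if k % 3 = 0 then 'a' else if k % 3 = 1 then 'c' else 'b') :: T k ++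
            [(if k % 3 = 0 then 'c' else if k % 3 = 1 then 'a' else 'b')])[j' + 1]?) = (T k)[j']? := by
          simp [List.getElem?_append, hlen, hj']
        rw [this, ih j' hj']

theorem T_eq_iff (k : Nat) (l : List Char) :
    l = T k ↔ (l.length = 2 * k + 1 ∧ ∀ j, j < 2 * k + 1 → l[j]? = some (tc k j)) := by
  constructor
  · rintro rfl
    exact ⟨T_length k, T_get k⟩
  · rintro ⟨hl, hg⟩
    apply List.ext_getElem?
    intro j
    by_cases hj : j < 2 * k + 1
    · rw [hg j hj, T_get k j hj]
    · rw [List.getElem?_eq_none (by omega), List.getElem?_eq_none (by rw [T_length]; omega)]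

theorem checkLayers_iff (l : List Char) (k : Nat) : ∀ d,
    checkLayers l k d = true ↔
      ∀ e, d ≤ e → e ≤ k →
        l[k - e]? = some (pairFor e).1 ∧ l[k + e]? = some (pairFor e).2 := by
  intro d
  induction hm : k + 1 - d generalizing d with
  | zero =>
    unfold checkLayers
    have hd : ¬ d ≤ k := by omega
    simp only [hd, if_false, true_iff]
    intro e he hek; omega
  | succ m ih =>
    unfold checkLayers
    have hd : d ≤ k := by omega
    simp only [hd, if_true]
    by_cases hp : l[k - d]? = some (pairFor d).1 ∧ l[k + d]? = some (pairFor d).2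
    · rw [if_pos hp, ih (d + 1) (by omega)]
      constructor
      · intro h e he hek
        rcases Nat.eq_or_lt_of_le he with rfl | hlt
        · exact hp
        · exact h e hlt hek
      · intro h e he hek
        exact h e (by omega) hek
    · rw [if_neg hp]
      simp only [Bool.false_eq_true, false_iff]
      intro h
      exact hp (h d le_rfl hd)

-- B in closed form
theorem pairFor_left (k j : Nat) (h : j < k) : (pairFor (k - j)).1 = tc k j := by
  unfold pairFor tc
  have h1 : ¬ (j = k) := by omega
  simp only [h1, if_false, h, if_true]
  split_ifs <;> rfl

theorem pairFor_right (k j : Nat) (h : k < j) : (pairFor (j - k)).2 = tc k j := by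
  unfold pairFor tc
  have h1 : ¬ (j = k) := by omega
  have h2 : ¬ (j < k) := by omega
  simp only [h1, if_false, h2]
  split_ifs <;> rfl

theorem tc_center (k : Nat) : tc k k = 'b' := by
  unfold tc; simp

theorem center_layers_iff (l : List Char) (k : Nat) (hlen2 : l.length = 2 * k + 1) :
    l = T k ↔ (l[k]? = some 'b' ∧ checkLayers l k 1 = true) := by
  rw [T_eq_iff, checkLayers_iff]
  constructor
  · rintro ⟨hlen, hg⟩
    refine ⟨?_, ?_⟩
    · rw [hg k (by omega), tc_center]
    · intro e he hek
      constructor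
      · have hkk : k - (k - e) = e := by omega
        rw [hg (k - e) (by omega), ← pairFor_left k (k - e) (by omega), hkk]
      · have hkk : (k + e) - k = e := by omega
        rw [hg (k + e) (by omega), ← pairFor_right k (k + e) (by omega), hkk]
  · rintro ⟨hc, hlay⟩
    refine ⟨hlen2, ?_⟩
    intro j hj
    rcases lt_trichotomy j k with hlt | rfl | hgt
    · have h1 := (hlay (k - j) (by omega) (by omega)).1
      have hkk : k - (k - j) = j := by omega
      rw [hkk] at h1
      rw [h1, pairFor_left k j hlt]
    · rw [hc, tc_center]
    · have h1 := (hlay (j - k) (by omega) (by omega)).2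
      have hkk : k + (j - k) = j := by omega
      rw [hkk] at h1
      rw [h1, pairFor_right k j hgt]

theorem solve_alt_eq (s : String) :
    solve_alt s = if s.toList.length % 2 = 1 ∧ s.toList = T (s.toList.length / 2)
      then ((s.toList.length / 2 : Nat) : Int) else -1 := by
  unfold solve_alt
  by_cases hpar : s.toList.length % 2 = 0
  · rw [if_pos hpar, if_neg (by rintro ⟨h1, _⟩; omega)]
  · have hodd : s.toList.length % 2 = 1 := by omega
    have hlen2 : s.toList.length = 2 * (s.toList.length / 2) + 1 := by omega
    have hiff := center_layers_iff s.toList (s.toList.length / 2) hlen2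
    rw [if_neg hpar]
    by_cases hTk : s.toList = T (s.toList.length / 2)
    · obtain ⟨h1, h2⟩ := hiff.mp hTk
      rw [if_neg (fun hne => hne h1), if_pos h2, if_pos ⟨hodd, hTk⟩]
    · by_cases hc : s.toList[s.toList.length / 2]? = some 'b'
      · have h2 : ¬ checkLayers s.toList (s.toList.length / 2) 1 = true :=
          fun h => hTk (hiff.mpr ⟨hc, h⟩)
        rw [if_neg (fun hne => hne hc), if_neg h2, if_neg (fun h => hTk h.2)]
      · rw [if_pos hc, if_neg (fun h => hTk h.2)]

-- A's loop in closed form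
theorem loopA (s : List Char) : ∀ n j, s.length - 2 * j ≤ n →
    solveLoopA s (T j) j =
      if s.length % 2 = 1 ∧ j < s.length / 2 ∧ s = T (s.length / 2)
        then ((s.length / 2 : Nat) : Int) else -1 := by
  intro n
  induction n with
  | zero =>
    intro j h
    unfold solveLoopA
    have hlen := T_length j
    have hle : ¬ ((T j).length ≤ s.length) := by omega
    rw [if_neg hle, if_neg (by rintro ⟨h1, h2, h3⟩; omega)]
  | succ n ih =>
    intro j h
    unfold solveLoopA
    have hlen := T_length j
    by_cases hle : (T j).length ≤ s.length
    · rw [if_pos hle]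
      have hstep : (if j % 3 = 0 then 'a' :: T j ++ ['c']
              else if j % 3 = 1 then 'c' :: T j ++ ['a']
              else 'b' :: T j ++ ['b']) = T (j + 1) := by
        simp only [T]
      simp only [hstep]
      by_cases hs : s = T (j + 1)
      · rw [if_pos hs]
        have hlen1 := T_length (j + 1)
        have hslen : s.length = 2 * (j + 1) + 1 := by rw [hs, hlen1]
        have hdiv : s.length / 2 = j + 1 := by omega
        rw [if_pos ⟨by omega, by omega, by rw [hdiv]; exact hs⟩, hdiv]
        push_cast; ring
      · rw [if_neg hs, ih (j + 1) (by omega)]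
        by_cases hcond : s.length % 2 = 1 ∧ j + 1 < s.length / 2 ∧ s = T (s.length / 2)
        · rw [if_pos hcond, if_pos ⟨hcond.1, by omega, hcond.2.2⟩]
        · rw [if_neg hcond, if_neg ?_]
          rintro ⟨h1, h2, h3⟩
          apply hcond
          refine ⟨h1, ?_, h3⟩
          rcases Nat.lt_or_ge (j + 1) (s.length / 2) with h4 | h4
          · exact h4
          · exfalso
            apply hs
            have hdiv : s.length / 2 = j + 1 := by omega
            rw [← hdiv]
            exact h3
    · rw [if_neg hle, if_neg (by rintro ⟨h1, h2, h3⟩; omega)]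

-- ===== VERDICT (by name: the statement is the Claim_ definition above) =====
theorem solve_spec : Claim_equal_solve := by
  unfold Claim_equal_solve
  intro s _
  unfold Spec_solve
  rw [solve_alt_eq]
  unfold solve
  by_cases h0 : s.toList = ['b']
  · rw [if_pos h0]
    have hcond : s.toList.length % 2 = 1 ∧ s.toList = T (s.toList.length / 2) := by
      rw [h0]; exact ⟨rfl, rfl⟩
    rw [if_pos hcond]
    simp [h0]
  · rw [if_neg h0]
    have hT0 : (['b'] : List Char) = T 0 := rfl
    rw [hT0, loopA s.toList s.toList.length 0 (by omega)]
    by_cases hcond : s.toList.length % 2 = 1 ∧ s.toList = T (s.toList.length / 2)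
    · have hpos : 0 < s.toList.length / 2 := by
        rcases Nat.eq_zero_or_pos (s.toList.length / 2) with hz | hp
        · exfalso
          apply h0
          rw [hz] at hcond
          exact hcond.2
        · exact hp
      rw [if_pos ⟨hcond.1, hpos, hcond.2⟩, if_pos hcond]
    · rw [if_neg (by rintro ⟨a, b, c⟩; exact hcond ⟨a, c⟩), if_neg hcond]
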